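-- pv_equiv track=rewrite | github.com/mango606/baekjoon-hub | 프로그래머스/2/142085. 디펜스 게임/디펜스 게임.py | solution
-- ===== SOURCE A (Python) =====
-- def solution(n, k, enemy):
--     answer = 0      # 진행한 라운드 수
--     enemys = [0] * 1000001      # 무적권 사용한 수
--
--     if len(enemy) <= k:
--         return len(enemy)
--
--     minX = 0
--
--     for i in range(k):
--         enemys[enemy[i]] += 1
--         if minX == 0 or minX > enemy[i]:
--             minX = enemy[i]
--
--     answer = k
--
--     for i in range(k, len(enemy)):
--         if minX < enemy[i]:
--             enemys[enemy[i]] += 1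
--             enemys[minX] -= 1
--             n -= minX
--
--             if enemys[minX] == 0:
--                 for j in range(minX + 1, len(enemys)):
--                     if enemys[j] > 0:
--                         minX = j
--                         break
--         else:
--             n -= enemy[i]
--
--         if n < 0:
--             break
--
--         answer += 1
--
--     return answer
-- ===== SOURCE B (Python) =====
-- def _insert_sorted(lst, e):
--     # new sorted list with e inserted after any equal elements
--     i = 0
--     while i < len(lst) and lst[i] <= e:
--         i += 1
--     return lst[:i] + [e] + lst[i:]
--
-- def solution(n, k, enemy):
--     if len(enemy) <= k:
--         return len(enemy)
--     chosen = sorted(enemy[:k])   # sorted window: the k enemies currently covered by invincibility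
--     answer = k
--     for e in enemy[k:]:
--         if chosen and chosen[0] < e:
--             n -= chosen[0]       # evict the smallest covered enemy, pay it with soldiers
--             chosen = _insert_sorted(chosen[1:], e)
--         else:
--             n -= e
--         if n < 0:
--             break
--         answer += 1
--     return answer
-- ===== Notes on version B (the rewrite author's own statement) =====
-- stated objective: alternative
-- what changed: A keeps a 1,000,001-slot counter array (allocated per call) plus a cached minimum refreshed by scanning the whole value range; B keeps the k covered enemies as a small sorted list (pop the head, insert in order), so no value-indexed array and no range scan exist at all.
-- intended difference: When k = 0, enemy is nonempty, 0 <= n and some nonempty prefix of enemy costs more than n, A returns len(enemy) (its leftover minX = 0 sentinel makes every positive enemy a free zero-cost swap) while B pays every enemy and returns the rounds actually survivable, the intended value since k = 0 grants no invincibility. — e.g. on solution(1, 0, [1, 1]): A returns 2, B returns 1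
-- outside the precondition, e.g. on solution(5, -2, [1, 2, 3]): A returns 3, B returns 0; on solution(1, 3, [0, 0, 3, 5]): A returns 3, B returns 4; on solution(15, 1, [-2, 1000000, 999999, -2, 1]): A returns 5, B returns 2
import Mathlib
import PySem

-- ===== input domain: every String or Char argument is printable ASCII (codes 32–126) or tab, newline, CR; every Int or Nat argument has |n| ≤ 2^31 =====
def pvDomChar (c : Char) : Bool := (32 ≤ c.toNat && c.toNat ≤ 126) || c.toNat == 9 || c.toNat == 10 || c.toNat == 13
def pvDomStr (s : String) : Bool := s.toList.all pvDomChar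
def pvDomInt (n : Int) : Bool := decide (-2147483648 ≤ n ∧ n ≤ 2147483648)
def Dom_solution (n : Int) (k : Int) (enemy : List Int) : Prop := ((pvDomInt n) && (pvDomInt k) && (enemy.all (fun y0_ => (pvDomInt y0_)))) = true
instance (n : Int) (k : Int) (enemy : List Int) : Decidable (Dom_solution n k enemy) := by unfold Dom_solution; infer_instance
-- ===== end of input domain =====

-- B replaces A's 1,000,001-slot counter array + cached minimum (refreshed by scanning the
-- value range) with a small sorted list of the k covered enemies: pop the head, insert in order.

-- ===== PORT A =====
-- A's array 'enemys' is ported as a total function Int → Int (exact for the indices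
-- 0..1000000 that A touches under Pre_solution; Python's negative-index wraparound and the
-- IndexError past the array lie outside Pre_solution).
def bumpA (c : Int → Int) (x : Int) (d : Int) : Int → Int :=
  fun y => if y = x then c y + d else c y

-- 'for j in range(minX + 1, len(enemys)): if enemys[j] > 0: minX = j; break'
def findMinXA (c : Int → Int) (minX : Int) : Int :=
  match (PySem.List.pyRange (minX + 1) 1000001 1).find? (fun j => decide (0 < c j)) with
  | some j => j
  | none => minX

-- 'for i in range(k):' building the counter and the running minimum
def initA (enemy : List Int) (k : Int) : (Int → Int) × Int :=
  (PySem.List.pyRange 0 k 1).foldl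
    (fun st i =>
      let e := PySem.List.pyGetD enemy i 0
      (bumpA st.1 e 1, if st.2 = 0 ∨ st.2 > e then e else st.2))
    ((fun _ => 0), 0)

-- 'for i in range(k, len(enemy)):' with the break on n < 0
def loopA (enemy : List Int) : List Int → Int → Int → (Int → Int) → Int → Int
  | [], _, answer, _, _ => answer
  | i :: rest, n, answer, c, minX =>
    let e := PySem.List.pyGetD enemy i 0
    if minX < e then
      let c' := bumpA (bumpA c e 1) minX (-1)
      let n' := n - minX
      let minX' := if c' minX = 0 then findMinXA c' minX else minX
      if n' < 0 then answer else loopA enemy rest n' (answer + 1) c' minX'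
    else
      if n - e < 0 then answer else loopA enemy rest (n - e) (answer + 1) c minX

def solution (n : Int) (k : Int) (enemy : List Int) : Int :=
  if (enemy.length : Int) ≤ k then (enemy.length : Int)
  else
    let st := initA enemy k
    loopA enemy (PySem.List.pyRange k (enemy.length : Int) 1) n k st.1 st.2

-- ===== PORT B =====
-- '_insert_sorted': insert e after any equal elements of the sorted list
def insortB (e : Int) : List Int → List Int
  | [] => [e]
  | a :: l => if a ≤ e then a :: insortB e l else e :: a :: l

def loopB : List Int → Int → Int → List Int → Int
  | [], _, answer, _ => answer
  | e :: rest, n, answer, chosen =>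
    match chosen with
    | m :: t =>
      if m < e then
        if n - m < 0 then answer else loopB rest (n - m) (answer + 1) (insortB e t)
      else
        if n - e < 0 then answer else loopB rest (n - e) (answer + 1) (m :: t)
    | [] => if n - e < 0 then answer else loopB rest (n - e) (answer + 1) []

def solution_alt (n : Int) (k : Int) (enemy : List Int) : Int :=
  if (enemy.length : Int) ≤ k then (enemy.length : Int)
  else loopB (PySem.List.slice enemy (some k) none) n k
             (PySem.List.sorted (PySem.List.slice enemy none (some k)) (fun x => x) false)

-- ===== PRECONDITION & SPEC =====
-- Pre_solution restricts to the task's natural domain: k ≥ 0 invincibility uses and, when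
-- the game is actually played because there are more than k enemies, per-round enemy counts
-- between 1 and 1000000 — exactly the problem statement's bound on enemy[i] (A's array is
-- sized for it). Outside it A raises IndexError past its array (counts above 1000000),
-- silently indexes the array from the end (negative k or negative counts wrap), or trips
-- its minX == 0 sentinel on a count of 0; with enemy.length ≤ k the counts are never
-- touched, so any values are admitted there.
def Pre_solution (n : Int) (k : Int) (enemy : List Int) : Prop :=
  0 ≤ k ∧ ((enemy.length : Int) ≤ k ∨ ∀ e ∈ enemy, 1 ≤ e ∧ e ≤ 1000000)
instance (n : Int) (k : Int) (enemy : List Int) : Decidable (Pre_solution n k enemy) := by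
  unfold Pre_solution; infer_instance

def pvWitness_solution : Int × Int × List Int := (7, 1, [2, 3])

-- When k = 0, enemy is nonempty, 0 ≤ n and some nonempty prefix of enemy costs more than n,
-- A returns len(enemy) (its leftover minX = 0 sentinel turns every enemy into a free
-- zero-cost swap) while B pays every enemy and returns the rounds actually survivable —
-- the intended value, since k = 0 grants no invincibility.
def D_solution (n : Int) (k : Int) (enemy : List Int) : Prop :=
  k = 0 ∧ enemy ≠ [] ∧ 0 ≤ n ∧ ∃ p ∈ enemy.inits, p ≠ [] ∧ n < p.sum
instance (n : Int) (k : Int) (enemy : List Int) : Decidable (D_solution n k enemy) := by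
  unfold D_solution; infer_instance

def Spec_solution (n : Int) (k : Int) (enemy : List Int) (out : Int) : Prop :=
  ¬ D_solution n k enemy → out = solution_alt n k enemy
instance (n : Int) (k : Int) (enemy : List Int) (out : Int) : Decidable (Spec_solution n k enemy out) := by
  unfold Spec_solution; infer_instance

def pvDiffWitness_solution : Int × Int × List Int := (1, 0, [1, 1])
def pvDiffWitnessOut_solution : Int × Int := (2, 1)

-- ===== CLAIM (what is proved, stated in full; the proofs are below) =====
def Claim_unchanged_solution : Prop := ∀ (n : Int) (k : Int) (enemy : List Int), Dom_solution n k enemy → Pre_solution n k enemy → Spec_solution n k enemy (solution n k enemy)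
def Claim_changed_solution : Prop := Dom_solution (pvDiffWitness_solution.1) (pvDiffWitness_solution.2.1) (pvDiffWitness_solution.2.2) ∧ Pre_solution (pvDiffWitness_solution.1) (pvDiffWitness_solution.2.1) (pvDiffWitness_solution.2.2) ∧ D_solution (pvDiffWitness_solution.1) (pvDiffWitness_solution.2.1) (pvDiffWitness_solution.2.2) ∧ solution (pvDiffWitness_solution.1) (pvDiffWitness_solution.2.1) (pvDiffWitness_solution.2.2) = pvDiffWitnessOut_solution.1 ∧ solution_alt (pvDiffWitness_solution.1) (pvDiffWitness_solution.2.1) (pvDiffWitness_solution.2.2) = pvDiffWitnessOut_solution.2 ∧ pvDiffWitnessOut_solution.1 ≠ pvDiffWitnessOut_solution.2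
def Claim_exact_solution : Prop := ∀ (n : Int) (k : Int) (enemy : List Int), Dom_solution n k enemy → Pre_solution n k enemy → D_solution n k enemy → solution n k enemy ≠ solution_alt n k enemy

-- ===== LEMMAS AND PROOFS =====

-- B-side insertion facts
lemma insort_perm (e : Int) (t : List Int) : (insortB e t).Perm (e :: t) := by
  induction t with
  | nil => simp [insortB]
  | cons a l ih =>
    simp only [insortB]
    split_ifs with h
    · exact (ih.cons a).trans (List.Perm.swap e a l)
    · exact List.Perm.refl _

lemma insort_ne_nil (e : Int) (t : List Int) : insortB e t ≠ [] := by
  cases t with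
  | nil => simp [insortB]
  | cons a l => simp only [insortB]; split_ifs <;> simp

lemma count_insort (e x : Int) (t : List Int) :
    (insortB e t).count x = (e :: t).count x := (insort_perm e t).count_eq x

lemma mem_insort {x e : Int} {t : List Int} : x ∈ insortB e t ↔ x = e ∨ x ∈ t := by
  rw [(insort_perm e t).mem_iff]; simp

lemma pairwise_insort {e : Int} {t : List Int} (h : t.Pairwise (· ≤ ·)) :
    (insortB e t).Pairwise (· ≤ ·) := by
  induction t with
  | nil => simp [insortB]
  | cons a l ih =>
    rcases List.pairwise_cons.mp h with ⟨ha, hl⟩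
    simp only [insortB]
    split_ifs with hae
    · refine List.pairwise_cons.mpr ⟨?_, ih hl⟩
      intro y hy
      rcases mem_insort.mp hy with rfl | hy
      · exact hae
      · exact ha y hy
    · refine List.pairwise_cons.mpr ⟨?_, h⟩
      intro y hy
      rcases List.mem_cons.mp hy with rfl | hy
      · omega
      · have := ha y hy; omega

lemma headI_insort_cons (e h : Int) (t : List Int) :
    (insortB e (h :: t)).headI = if h ≤ e then h else e := by
  simp only [insortB]; split_ifs <;> simp

-- first element of a range satisfying a predicate
lemma find?_pyRange (p : Int → Bool) (b j : Int) :
    ∀ (d : Nat) (a : Int), (j - a).toNat = d → a ≤ j → j < b → p j = true →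
    (∀ x, a ≤ x → x < j → p x = false) →
    (PySem.List.pyRange a b).find? p = some j := by
  intro d
  induction d with
  | zero =>
    intro a hd haj hjb hp _
    have : a = j := by omega
    subst this
    rw [PySem.List.pyRange_one_cons hjb]
    simp [List.find?, hp]
  | succ d ih =>
    intro a hd haj hjb hp hmin
    have haj' : a < j := by omega
    rw [PySem.List.pyRange_one_cons (by omega : a < b)]
    rw [List.find?_cons_of_neg (by simp [hmin a le_rfl haj'])]
    exact ih (a + 1) (by omega) (by omega) hjb hp (fun x h1 h2 => hmin x (by omega) h2)

-- the invariant tying A's counter + cached minimum to B's sorted window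
def InvS (c : Int → Int) (minX : Int) (l : List Int) : Prop :=
  l.Pairwise (· ≤ ·) ∧ (∀ x ∈ l, -1000000 ≤ x ∧ x ≤ 1000000) ∧
  (∀ x, c x = (l.count x : Int)) ∧ minX = l.headI

lemma step_swap {c : Int → Int} {m : Int} {t : List Int}
    (hInv : InvS c m (m :: t)) {e : Int} (he1 : -1000000 ≤ e) (he2 : e ≤ 1000000) (hlt : m < e) :
    (if bumpA (bumpA c e 1) m (-1) m = 0 then findMinXA (bumpA (bumpA c e 1) m (-1)) m else m)
      = (insortB e t).headI ∧
    InvS (bumpA (bumpA c e 1) m (-1)) ((insortB e t).headI) (insortB e t) := by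
  obtain ⟨hpw, hbd, hcnt, hhead⟩ := hInv
  have hme : m ≠ e := by omega
  set c' := bumpA (bumpA c e 1) m (-1) with hc'def
  have hcc : ∀ (a x : Int) (l : List Int),
      (((a :: l).count x : Int)) = (l.count x : Int) + (if x = a then 1 else 0) := by
    intro a x l
    rw [List.count_cons]
    by_cases h : x = a
    · subst h; simp
    · have h2 : ¬ (a = x) := fun hh => h hh.symm
      simp [h, h2]
  have hc' : ∀ x, c' x = ((insortB e t).count x : Int) := by
    intro x
    rw [count_insort, hcc e x t]
    simp only [hc'def, bumpA]
    rw [hcnt x, hcc m x t]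
    split_ifs <;> omega
  have hmt : ∀ x ∈ t, m ≤ x := (List.pairwise_cons.mp hpw).1
  have hpwt : t.Pairwise (· ≤ ·) := (List.pairwise_cons.mp hpw).2
  have hbdt : ∀ x ∈ insortB e t, -1000000 ≤ x ∧ x ≤ 1000000 := by
    intro x hx
    rcases mem_insort.mp hx with rfl | hx
    · exact ⟨he1, he2⟩
    · exact hbd x (by simp [hx])
  have hcm : c' m = (t.count m : Int) := by
    rw [hc' m, count_insort]
    simp only [List.count_cons]
    simp
    omega
  have hhead_eq :
      (if c' m = 0 then findMinXA c' m else m) = (insortB e t).headI := by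
    cases t with
    | nil =>
      have hcm0 : c' m = 0 := by rw [hcm]; simp
      rw [if_pos hcm0]
      have : (insortB e ([] : List Int)) = [e] := by simp [insortB]
      rw [this]
      show findMinXA c' m = e
      unfold findMinXA
      rw [find?_pyRange (fun j => decide (0 < c' j)) 1000001 e (e - (m+1)).toNat (m+1)
        rfl (by omega) (by omega)
        (by simp only [decide_eq_true_eq]; rw [hc' e]; simp [insortB])
        (fun x h1 h2 => by
          simp only [decide_eq_false_iff_not, not_lt]
          rw [hc' x]
          have : x ∉ insortB e ([] : List Int) := by
            simp [insortB]; omega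
          simp [List.count_eq_zero_of_not_mem this])]
    | cons h t' =>
      have hmh : m ≤ h := hmt h (by simp)
      have hht' : ∀ x ∈ t', h ≤ x := (List.pairwise_cons.mp hpwt).1
      by_cases hmem : m ∈ h :: t'
      · -- m still present: minimum unchanged, and h = m
        have hhm : h ≤ m := by
          rcases List.mem_cons.mp hmem with rfl | hx
          · exact le_rfl
          · exact hht' m hx
        have hhm' : h = m := le_antisymm hhm hmh
        have : c' m ≠ 0 := by
          rw [hcm]
          have : 0 < (h :: t').count m := List.count_pos_iff.mpr hmem
          omega
        rw [if_neg this, headI_insort_cons, if_pos (by omega), hhm']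
      · -- m gone: A rescans; the scan yields min h e, B's new head
        have hcm0 : c' m = 0 := by
          rw [hcm, List.count_eq_zero_of_not_mem hmem]; simp
        rw [if_pos hcm0, headI_insort_cons]
        set j := if h ≤ e then h else e with hjdef
        have hmj : m < j := by
          have : m ≠ h := fun hmh' => hmem (by simp [hmh'])
          simp only [hjdef]; split_ifs <;> omega
        have hjmem : j ∈ insortB e (h :: t') := by
          rw [mem_insort]
          simp only [hjdef]; split_ifs with hhe
          · right; simp
          · left; rfl
        have hjbd : j ≤ 1000000 := (hbdt j hjmem).2
        unfold findMinXA
        rw [find?_pyRange (fun x => decide (0 < c' x)) 1000001 j (j - (m+1)).toNat (m+1)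
          rfl (by omega) (by omega)
          (by simp only [decide_eq_true_eq]; rw [hc' j]
              have : 0 < (insortB e (h :: t')).count j := List.count_pos_iff.mpr hjmem
              omega)
          (fun x h1 h2 => by
            simp only [decide_eq_false_iff_not, not_lt]
            rw [hc' x]
            have hxn : x ∉ insortB e (h :: t') := by
              intro hx
              rcases mem_insort.mp hx with rfl | hx
              · simp only [hjdef] at h2; split_ifs at h2 <;> omega
              · have hhx : h ≤ x := by
                  rcases List.mem_cons.mp hx with rfl | hx'
                  · exact le_rfl
                  · exact hht' x hx'
                have : j ≤ h := by simp only [hjdef]; split_ifs <;> omega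
                omega
            simp [List.count_eq_zero_of_not_mem hxn])]
  refine ⟨hhead_eq, pairwise_insort hpwt, hbdt, hc', rfl⟩

-- main loop of A (counter + rescan) vs main loop of B (sorted window), in lockstep
lemma loopAB (enemy : List Int) (hbd : ∀ x ∈ enemy, -1000000 ≤ x ∧ x ≤ 1000000) :
    ∀ (d : Nat) (i n ans : Int) (c : Int → Int) (minX : Int) (chosen : List Int),
    0 ≤ i → enemy.length - i.toNat = d → InvS c minX chosen → chosen ≠ [] →
    loopA enemy (PySem.List.pyRange i (enemy.length : Int)) n ans c minX
      = loopB (enemy.drop i.toNat) n ans chosen := by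
  intro d
  induction d with
  | zero =>
    intro i n ans c minX chosen hi hd _ _
    have hge : (enemy.length : Int) ≤ i := by omega
    rw [PySem.List.pyRange_one_eq_nil hge, List.drop_eq_nil_of_le (by omega)]
    rfl
  | succ d ih =>
    intro i n ans c minX chosen hi hd hInv hne
    have hilen : i.toNat < enemy.length := by omega
    have hilt : i < (enemy.length : Int) := by omega
    rw [PySem.List.pyRange_one_cons hilt, List.drop_eq_getElem_cons hilen]
    obtain ⟨m, t, rfl⟩ : ∃ m t, chosen = m :: t := by
      cases chosen with
      | nil => exact absurd rfl hne
      | cons a l => exact ⟨a, l, rfl⟩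
    have hm : minX = m := by simpa using hInv.2.2.2
    rw [hm] at hInv ⊢
    have hget : PySem.List.pyGetD enemy i 0 = enemy[i.toNat] :=
      PySem.List.pyGetD_eq_getElem enemy 0 hi (by omega)
    set e := enemy[i.toNat] with hedef
    have hebd : -1000000 ≤ e ∧ e ≤ 1000000 := hbd e (List.getElem_mem hilen)
    simp only [loopA, loopB, hget]
    by_cases hlt : m < e
    · -- swap branch
      obtain ⟨hmx, hInv'⟩ := step_swap hInv hebd.1 hebd.2 hlt
      rw [if_pos hlt, if_pos hlt, hmx]
      by_cases hn : n - m < 0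
      · rw [if_pos hn, if_pos hn]
      · rw [if_neg hn, if_neg hn]
        have hrec := ih (i + 1) (n - m) (ans + 1) _ _ (insortB e t) (by omega) (by omega)
          hInv' (insort_ne_nil e t)
        rw [show (i + 1).toNat = i.toNat + 1 by omega] at hrec
        exact hrec
    · -- pay branch
      rw [if_neg hlt, if_neg hlt]
      by_cases hn : n - e < 0
      · rw [if_pos hn, if_pos hn]
      · rw [if_neg hn, if_neg hn]
        have hrec := ih (i + 1) (n - e) (ans + 1) c m (m :: t) (by omega) (by omega) hInv hne
        rw [show (i + 1).toNat = i.toNat + 1 by omega] at hrec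
        exact hrec

-- A's 'minX == 0'-sentinel running minimum of the initial 'for i in range(k)' loop
def gstep (m e : Int) : Int := if m = 0 ∨ m > e then e else m

def gmin (l : List Int) : Int := l.foldl gstep 0

lemma gmin_append (l : List Int) (e : Int) : gmin (l ++ [e]) = gstep (gmin l) e := by
  simp [gmin, List.foldl_append]

-- gmin is always an element (or the untouched sentinel 0)
lemma gmin_mem_or_zero : ∀ (l : List Int), gmin l ∈ l ∨ gmin l = 0 := by
  intro l
  induction l using List.reverseRecOn with
  | nil => exact Or.inr rfl
  | append_singleton l e ih =>
    rw [gmin_append, gstep]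
    split_ifs
    · exact Or.inl (by simp)
    · rcases ih with h | h
      · exact Or.inl (List.mem_append.mpr (Or.inl h))
      · exact Or.inr h

-- with a negative element present, the sentinel never fires and gmin is the true minimum
lemma gmin_least_neg : ∀ (l : List Int), (∃ x ∈ l, x < 0) →
    gmin l ∈ l ∧ ∀ x ∈ l, gmin l ≤ x := by
  intro l
  induction l using List.reverseRecOn with
  | nil => intro h; simp at h
  | append_singleton l e ih =>
    intro h
    rw [gmin_append, gstep]
    by_cases hneg : ∃ x ∈ l, x < 0
    · obtain ⟨hmem, hle⟩ := ih hneg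
      obtain ⟨w, hw, hw0⟩ := hneg
      have hg0 : gmin l < 0 := lt_of_le_of_lt (hle w hw) hw0
      split_ifs with hc
      · have hge : e < gmin l := by rcases hc with hc | hc <;> omega
        refine ⟨by simp, ?_⟩
        intro x hx
        rcases List.mem_append.mp hx with hx | hx
        · have := hle x hx; omega
        · simp at hx; omega
      · refine ⟨List.mem_append.mpr (Or.inl hmem), ?_⟩
        have hc2 : ¬ gmin l > e := fun hh => hc (Or.inr hh)
        intro x hx
        rcases List.mem_append.mp hx with hx | hx
        · exact hle x hx
        · simp at hx; omega
    · have he : e < 0 := by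
        obtain ⟨w, hw, hw0⟩ := h
        rcases List.mem_append.mp hw with hw | hw
        · exact absurd ⟨w, hw, hw0⟩ hneg
        · simp at hw; omega
      have hl0 : ∀ x ∈ l, 0 ≤ x := fun x hx => by
        by_contra hx0
        exact hneg ⟨x, hx, by omega⟩
      have hgl0 : 0 ≤ gmin l := by
        rcases gmin_mem_or_zero l with h2 | h2
        · exact hl0 _ h2
        · omega
      rw [if_pos (by
        by_cases h0 : gmin l = 0
        · exact Or.inl h0
        · exact Or.inr (by omega))]
      refine ⟨by simp, ?_⟩
      intro x hx
      rcases List.mem_append.mp hx with hx | hx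
      · have := hl0 x hx; omega
      · simp at hx; omega

lemma gmin_least_nozero : ∀ (l : List Int), l ≠ [] → (∀ x ∈ l, x ≠ 0) →
    gmin l ∈ l ∧ ∀ x ∈ l, gmin l ≤ x := by
  intro l
  induction l using List.reverseRecOn with
  | nil => intro h; exact absurd rfl h
  | append_singleton l e ih =>
    intro _ hz
    rw [gmin_append, gstep]
    by_cases hl : l = []
    · subst hl
      rw [show gmin [] = 0 from rfl, if_pos (Or.inl rfl)]
      refine ⟨by simp, ?_⟩
      intro x hx
      simp at hx
      omega
    · obtain ⟨hmem, hle⟩ := ih hl (fun x hx => hz x (List.mem_append.mpr (Or.inl hx)))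
      have hg0 : gmin l ≠ 0 := hz _ (List.mem_append.mpr (Or.inl hmem))
      split_ifs with hc
      · have hge : e < gmin l := by rcases hc with hc | hc <;> omega
        refine ⟨by simp, ?_⟩
        intro x hx
        rcases List.mem_append.mp hx with hx | hx
        · have := hle x hx; omega
        · simp at hx; omega
      · have hc2 : ¬ gmin l > e := fun hh => hc (Or.inr hh)
        refine ⟨List.mem_append.mpr (Or.inl hmem), ?_⟩
        intro x hx
        rcases List.mem_append.mp hx with hx | hx
        · exact hle x hx
        · simp at hx; omega

lemma gmin_least_last0 : ∀ (l : List Int), l.getLast? = some 0 →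
    gmin l ∈ l ∧ ∀ x ∈ l, gmin l ≤ x := by
  intro l hlast
  have hne : l ≠ [] := by intro h; rw [h] at hlast; simp at hlast
  obtain ⟨l', rfl⟩ : ∃ l', l = l' ++ [0] := by
    refine ⟨l.dropLast, ?_⟩
    have h1 := List.dropLast_concat_getLast hne
    have h2 : l.getLast hne = 0 := by
      have := List.getLast?_eq_getLast hne
      rw [hlast] at this
      exact (Option.some_injective _ this.symm)
    rw [← h2]
    exact h1.symm
  rw [gmin_append, gstep]
  by_cases hneg : ∃ x ∈ l', x < 0
  · obtain ⟨hmem, hle⟩ := gmin_least_neg l' hneg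
    obtain ⟨w, hw, hw0⟩ := hneg
    have hg0 : gmin l' < 0 := lt_of_le_of_lt (hle w hw) hw0
    rw [if_neg (by omega)]
    refine ⟨List.mem_append.mpr (Or.inl hmem), ?_⟩
    intro x hx
    rcases List.mem_append.mp hx with hx | hx
    · exact hle x hx
    · simp at hx; omega
  · have hl0 : ∀ x ∈ l', 0 ≤ x := fun x hx => by
      by_contra hx0
      exact hneg ⟨x, hx, by omega⟩
    have hgl0 : 0 ≤ gmin l' := by
      rcases gmin_mem_or_zero l' with h2 | h2
      · exact hl0 _ h2
      · omega
    rw [if_pos (by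
      by_cases h0 : gmin l' = 0
      · exact Or.inl h0
      · exact Or.inr (by omega))]
    refine ⟨by simp, ?_⟩
    intro x hx
    rcases List.mem_append.mp hx with hx | hx
    · have := hl0 x hx; omega
    · simp at hx; omega

-- the counter built by the initial loop counts the prefix
lemma foldCount : ∀ (l : List Int) (x : Int),
    (l.foldl (fun c e => bumpA c e 1) (fun _ => 0)) x = (l.count x : Int) := by
  intro l
  induction l using List.reverseRecOn with
  | nil => intro x; simp
  | append_singleton l e ih =>
    intro x
    rw [List.foldl_append]
    simp only [List.foldl_cons, List.foldl_nil, bumpA, List.count_append]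
    rw [ih x]
    by_cases hxe : x = e
    · subst hxe; simp
    · have h2 : ¬ (e = x) := fun hh => hxe hh.symm
      simp [hxe, h2]

lemma initA_inv (enemy : List Int) (k : Int) (hk1 : 1 ≤ k) (hkl : k ≤ (enemy.length : Int))
    (hbd : ∀ x ∈ enemy, -1000000 ≤ x ∧ x ≤ 1000000)
    (hgood : enemy.take k.toNat = [] ∨ (∃ x ∈ enemy.take k.toNat, x < 0) ∨
      (∀ x ∈ enemy.take k.toNat, x ≠ 0) ∨ (enemy.take k.toNat).getLast? = some 0) :
    InvS (initA enemy k).1 (initA enemy k).2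
      (PySem.List.sorted (enemy.take k.toNat) (fun x => x) false) ∧
    PySem.List.sorted (enemy.take k.toNat) (fun x => x) false ≠ [] := by
  set P := enemy.take k.toNat with hPdef
  have hPlen : P.length = k.toNat := by
    simp [hPdef, List.length_take]; omega
  have hPsub : ∀ x ∈ P, x ∈ enemy := fun x hx => List.mem_of_mem_take hx
  have hPbd : ∀ x ∈ P, -1000000 ≤ x ∧ x ≤ 1000000 := fun x hx => hbd x (hPsub x hx)
  have hPne : P ≠ [] := by
    intro h
    rw [h] at hPlen
    simp at hPlen
    omega
  -- rewrite the index-based fold into a fold over the prefix P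
  have hfold : initA enemy k
      = P.foldl (fun st e => (bumpA st.1 e 1, if st.2 = 0 ∨ st.2 > e then e else st.2))
          ((fun _ => 0), 0) := by
    unfold initA
    rw [PySem.List.foldl_congr_mem _ _
      (fun acc x => (bumpA acc.1 (PySem.List.pyGetD P x 0) 1,
        if acc.2 = 0 ∨ acc.2 > PySem.List.pyGetD P x 0 then PySem.List.pyGetD P x 0 else acc.2)) _
      (by
        intro acc x hx
        rcases PySem.List.mem_pyRange_one.mp hx with ⟨hx0, hxk⟩
        have h1 : PySem.List.pyGetD enemy x 0 = enemy[x.toNat]'(by omega) :=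
          PySem.List.pyGetD_eq_getElem enemy 0 hx0 (by omega)
        have h2 : PySem.List.pyGetD P x 0 = enemy[x.toNat]'(by omega) := by
          rw [PySem.List.pyGetD_eq_getElem P 0 hx0 (by omega)]
          simp [hPdef, List.getElem_take]
        simp only [h1, h2])]
    rw [show k = (P.length : Int) by omega]
    exact PySem.List.foldl_pyRange_zero_pyGetD' P 0
      (fun st e => (bumpA st.1 e 1, if st.2 = 0 ∨ st.2 > e then e else st.2)) _
  have hsplit : P.foldl (fun st e => (bumpA st.1 e 1, if st.2 = 0 ∨ st.2 > e then e else st.2))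
      ((fun _ => 0), 0)
      = (P.foldl (fun c e => bumpA c e 1) (fun _ => 0), P.foldl gstep 0) :=
    PySem.List.foldl_prod_mk (fun c e => bumpA c e 1) gstep P _ _
  -- the sentinel-minimum really is the minimum on the admitted prefixes
  have hleast : gmin P ∈ P ∧ ∀ x ∈ P, gmin P ≤ x := by
    rcases hgood with h | h | h | h
    · exact absurd h hPne
    · exact gmin_least_neg P h
    · exact gmin_least_nozero P hPne h
    · exact gmin_least_last0 P h
  obtain ⟨hm, hle⟩ := hleast
  have hsne : PySem.List.sorted P (fun x => x) false ≠ [] := by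
    intro h
    have := PySem.List.length_sorted P (fun x => x) false
    rw [h] at this
    simp at this
    omega
  obtain ⟨m', t', hs⟩ : ∃ m' t', PySem.List.sorted P (fun x => x) false = m' :: t' := by
    cases hsort : PySem.List.sorted P (fun x => x) false with
    | nil => exact absurd hsort hsne
    | cons a l => exact ⟨a, l, rfl⟩
  have hm'P : m' ∈ P := by
    rw [← PySem.List.mem_sorted P (fun x => x) false, hs]; simp
  have hm'le : ∀ y ∈ P, m' ≤ y := PySem.List.key_head_sorted_le P (fun x => x) hs
  have hmin_eq : (initA enemy k).2 = m' := by
    rw [hfold, hsplit]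
    exact le_antisymm (hle m' hm'P) (hm'le _ hm)
  refine ⟨⟨?_, ?_, ?_, ?_⟩, hsne⟩
  · exact PySem.List.sorted_pairwise P (fun x => x)
  · intro x hx
    exact hPbd x ((PySem.List.mem_sorted P (fun x => x) false x).mp hx)
  · intro x
    rw [hfold, hsplit]
    show (P.foldl (fun c e => bumpA c e 1) (fun _ => 0)) x = _
    rw [foldCount P x, ((PySem.List.sorted_perm P (fun x => x) false).count_eq x)]
  · rw [hmin_eq, hs]; rfl

-- k = 0 after the first round: A's leftover minX = 0 makes every positive enemy a free swap
lemma loopA_k0_pos (enemy : List Int) :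
    ∀ (d : Nat) (i n ans : Int) (c : Int → Int), 0 ≤ i → enemy.length - i.toNat = d →
    0 ≤ n → c 0 ≤ 0 →
    loopA enemy (PySem.List.pyRange i (enemy.length : Int)) n ans c 0 = ans + (d : Int) := by
  intro d
  induction d with
  | zero =>
    intro i n ans c hi hd _ _
    rw [PySem.List.pyRange_one_eq_nil (by omega)]
    simp [loopA]
  | succ d ih =>
    intro i n ans c hi hd hn hc
    have hilen : i.toNat < enemy.length := by omega
    rw [PySem.List.pyRange_one_cons (by omega : i < (enemy.length : Int))]
    have hget : PySem.List.pyGetD enemy i 0 = enemy[i.toNat] :=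
      PySem.List.pyGetD_eq_getElem enemy 0 hi (by omega)
    simp only [loopA, hget]
    by_cases hpos : (0 : Int) < enemy[i.toNat]
    · rw [if_pos hpos]
      have hc' : bumpA (bumpA c enemy[i.toNat] 1) 0 (-1) 0 = c 0 - 1 := by
        show (if (0:Int) = 0 then (if (0:Int) = enemy[i.toNat] then c 0 + 1 else c 0) + (-1)
          else (if (0:Int) = enemy[i.toNat] then c 0 + 1 else c 0)) = c 0 - 1
        rw [if_pos rfl, if_neg (by omega : ¬ (0:Int) = enemy[i.toNat])]
        ring
      rw [if_neg (by omega : ¬ n - 0 < 0)]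
      rw [if_neg (by rw [hc']; omega)]
      rw [ih (i + 1) (n - 0) (ans + 1) _ (by omega) (by omega) (by omega) (by rw [hc']; omega)]
      omega
    · rw [if_neg hpos]
      rw [if_neg (by omega : ¬ n - enemy[i.toNat] < 0)]
      rw [ih (i + 1) (n - enemy[i.toNat]) (ans + 1) c (by omega) (by omega) (by omega) hc]
      omega

lemma initA_zero (enemy : List Int) : initA enemy 0 = ((fun _ => 0), 0) := by
  unfold initA
  rw [PySem.List.pyRange_one_eq_nil le_rfl]
  rfl

-- A's total value in the k = 0 case: only the first round can break
lemma solution_k0 (n : Int) (enemy : List Int) (hne : enemy ≠ []) :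
    solution n 0 enemy
      = if n - min enemy.headI 0 < 0 then 0 else (enemy.length : Int) := by
  obtain ⟨e, r, rfl⟩ : ∃ e r, enemy = e :: r := by
    cases enemy with
    | nil => exact absurd rfl hne
    | cons a l => exact ⟨a, l, rfl⟩
  have hlen : 0 < (e :: r).length := by simp
  unfold solution
  rw [if_neg (by push_cast; omega)]
  simp only [initA_zero]
  rw [PySem.List.pyRange_one_cons (by push_cast; omega : (0:Int) < ((e :: r).length : Int))]
  simp only [loopA, PySem.List.pyGetD_zero_cons, List.headI]
  by_cases hpos : (0 : Int) < e
  · have hmin : min e 0 = 0 := by omega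
    rw [if_pos hpos]
    simp only [hmin]
    have hc' : bumpA (bumpA (fun _ => (0:Int)) e 1) 0 (-1) 0 = -1 := by
      show (if (0:Int) = 0 then (if (0:Int) = e then (0:Int) + 1 else 0) + (-1)
        else (if (0:Int) = e then (0:Int) + 1 else 0)) = -1
      rw [if_pos rfl, if_neg (by omega : ¬ (0:Int) = e)]
      ring
    by_cases hn : n - 0 < 0
    · rw [if_pos hn, if_pos (by omega : n - 0 < 0)]
    · rw [if_neg hn, if_neg (by omega : ¬ n - 0 < 0), if_neg (by rw [hc']; omega)]
      rw [loopA_k0_pos (e :: r) ((e :: r).length - 1) (0 + 1) (n - 0) (0 + 1) _ (by omega)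
        (by norm_num) (by omega) (by rw [hc']; omega)]
      simp
      omega
  · have hmin : min e 0 = e := by omega
    rw [if_neg hpos]
    simp only [hmin]
    by_cases hn : n - e < 0
    · rw [if_pos hn, if_pos hn]
    · rw [if_neg hn, if_neg hn]
      rw [loopA_k0_pos (e :: r) ((e :: r).length - 1) (0 + 1) (n - e) (0 + 1) (fun _ => 0) (by omega)
        (by norm_num) (by omega) (by simp)]
      simp
      omega

-- k = 0 on B's side: with no invincibility every enemy is paid
lemma loopB_nil_all : ∀ (l : List Int) (n ans : Int),
    (∀ p, p <+: l → p ≠ [] → p.sum ≤ n) →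
    loopB l n ans [] = ans + (l.length : Int) := by
  intro l
  induction l with
  | nil => intro n ans _; simp [loopB]
  | cons e r ih =>
    intro n ans h
    have he : e ≤ n := by
      have := h [e] (List.cons_prefix_cons.mpr ⟨rfl, List.nil_prefix⟩) (by simp)
      simpa using this
    simp only [loopB]
    rw [if_neg (by omega : ¬ n - e < 0)]
    rw [ih (n - e) (ans + 1) (fun p hp hpne => by
      have := h (e :: p) (List.cons_prefix_cons.mpr ⟨rfl, hp⟩) (by simp)
      simp at this
      omega)]
    rw [List.length_cons]
    push_cast
    ring

-- B breaks strictly early when some nonempty prefix exceeds n (uncovered loop)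
lemma loopB_nil_strict : ∀ (l : List Int) (n ans : Int),
    (∃ p, p <+: l ∧ p ≠ [] ∧ n < p.sum) →
    loopB l n ans [] < ans + (l.length : Int) := by
  intro l
  induction l with
  | nil =>
    intro n ans ⟨p, hp, hpne, _⟩
    exact absurd (List.prefix_nil.mp hp) hpne
  | cons e r ih =>
    intro n ans ⟨p, hp, hpne, hsum⟩
    simp only [loopB]
    split_ifs with h
    · rw [List.length_cons]
      push_cast
      omega
    · obtain ⟨p', rfl⟩ : ∃ p', p = e :: p' := by
        cases p with
        | nil => exact absurd rfl hpne
        | cons a q => exact ⟨q, by rw [(List.cons_prefix_cons.mp hp).1]⟩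
      have hp' : p' <+: r := (List.cons_prefix_cons.mp hp).2
      have hsum' : n - e < p'.sum := by simp at hsum; omega
      have hp'ne : p' ≠ [] := by
        intro hnil
        rw [hnil] at hsum'
        simp at hsum'
        omega
      have := ih (n - e) (ans + 1) ⟨p', hp', hp'ne, hsum'⟩
      rw [List.length_cons]
      push_cast at this ⊢
      omega

-- ===== VERDICT (by name: the statement is the Claim_ definition above) =====
theorem solution_spec : Claim_unchanged_solution := by
  intro n k enemy _ hpre hnD
  obtain ⟨hk0, hor⟩ := hpre
  by_cases hle : (enemy.length : Int) ≤ k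
  · unfold solution solution_alt
    rw [if_pos hle, if_pos hle]
  · have hbd : ∀ e ∈ enemy, (1:Int) ≤ e ∧ e ≤ 1000000 := hor.resolve_left hle
    have hbd' : ∀ x ∈ enemy, (-1000000:Int) ≤ x ∧ x ≤ 1000000 := fun x hx =>
      ⟨by have := (hbd x hx).1; omega, (hbd x hx).2⟩
    push_neg at hle
    by_cases hk : k = 0
    · subst hk
      have hne : enemy ≠ [] := by
        intro h; rw [h] at hle; simp at hle
      rw [solution_k0 n enemy hne]
      obtain ⟨e, r, rfl⟩ : ∃ e r, enemy = e :: r := by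
        cases enemy with
        | nil => exact absurd rfl hne
        | cons a l => exact ⟨a, l, rfl⟩
      have he0 : (1:Int) ≤ e := (hbd e (by simp)).1
      have hmin : min (e :: r).headI 0 = 0 := by
        simp only [List.headI]
        omega
      rw [hmin]
      unfold solution_alt
      rw [PySem.List.slice_from (e :: r) le_rfl, PySem.List.slice_to (e :: r) le_rfl]
      simp only [Int.toNat_zero, List.drop_zero, List.take_zero]
      have hsortnil : PySem.List.sorted ([] : List Int) (fun x => x) false = [] := by
        have := PySem.List.length_sorted ([] : List Int) (fun x => x) false
        simpa using List.length_eq_zero_iff.mp (by simpa using this)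
      rw [hsortnil, if_neg (show ¬ ((e :: r).length : Int) ≤ 0 by push_cast; omega)]
      by_cases hA : n - 0 < 0
      · rw [if_pos hA]
        simp only [loopB]
        rw [if_pos (by omega : n - e < 0)]
      · rw [if_neg hA]
        have hall : ∀ p, p <+: (e :: r) → p ≠ [] → p.sum ≤ n := by
          intro p hp hpne
          by_contra hgt
          exact hnD ⟨rfl, hne, by omega, p, (List.mem_inits p (e :: r)).mpr hp, hpne, by omega⟩
        rw [loopB_nil_all (e :: r) n 0 hall]
        omega
    · -- k ≥ 1: the generic lockstep argument (counts ≥ 1, so the sentinel never misfires)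
      have hk1 : 1 ≤ k := by omega
      have hgood : enemy.take k.toNat = [] ∨ (∃ x ∈ enemy.take k.toNat, x < 0) ∨
          (∀ x ∈ enemy.take k.toNat, x ≠ 0) ∨ (enemy.take k.toNat).getLast? = some 0 := by
        right; right; left
        intro x hx
        have := (hbd x (List.mem_of_mem_take hx)).1
        omega
      obtain ⟨hInv, hsne⟩ := initA_inv enemy k hk1 (le_of_lt hle) hbd' hgood
      unfold solution solution_alt
      rw [if_neg (by omega), if_neg (by omega)]
      rw [PySem.List.slice_from enemy hk0, PySem.List.slice_to enemy hk0]
      exact loopAB enemy hbd' (enemy.length - k.toNat) k n k _ _ _ hk0 rfl hInv hsne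

theorem solution_changed : Claim_changed_solution := by
  unfold Claim_changed_solution; decide

theorem solution_tight : Claim_exact_solution := by
  intro n k enemy _ hpre hD
  obtain ⟨rfl, hne, hn0, p, hpmem, hpne, hpsum⟩ := hD
  have hlen : 0 < enemy.length := List.length_pos_iff.mpr hne
  have hbd : ∀ e ∈ enemy, (1:Int) ≤ e ∧ e ≤ 1000000 :=
    hpre.2.resolve_left (by push_cast; omega)
  have hmin : min enemy.headI 0 = 0 := by
    obtain ⟨e, r, rfl⟩ : ∃ e r, enemy = e :: r := by
      cases enemy with
      | nil => exact absurd rfl hne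
      | cons a l => exact ⟨a, l, rfl⟩
    have := (hbd e (by simp)).1
    simp only [List.headI]
    omega
  rw [solution_k0 n enemy hne, hmin, if_neg (by omega : ¬ n - 0 < 0)]
  unfold solution_alt
  rw [if_neg (by push_cast; omega)]
  rw [PySem.List.slice_from enemy le_rfl, PySem.List.slice_to enemy le_rfl]
  simp only [Int.toNat_zero, List.drop_zero, List.take_zero]
  have hsortnil : PySem.List.sorted ([] : List Int) (fun x => x) false = [] := by
    have := PySem.List.length_sorted ([] : List Int) (fun x => x) false
    simpa using List.length_eq_zero_iff.mp (by simpa using this)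
  rw [hsortnil]
  have := loopB_nil_strict enemy n 0 ⟨p, (List.mem_inits p enemy).mp hpmem, hpne, hpsum⟩
  omega
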